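-- pv_equiv track=rewrite | github.com/adawgwats/BiteGraph | scripts/fdc_map_eval.py | choose_candidates
-- ===== SOURCE A (Python) =====
-- def choose_candidates(tokens: list[str], token_index: dict[str, list[int]]) -> list[int]:
--     lists = [(t, token_index[t]) for t in tokens if t in token_index]
--     if not lists:
--         return []
--     lists.sort(key=lambda x: len(x[1]))
--     candidates = set(lists[0][1])
--     for _, idxs in lists[1:2]:
--         candidates.update(idxs)
--     return list(candidates)
-- ===== SOURCE B (Python) =====
-- def choose_candidates(tokens: list[str], token_index: dict[str, list[int]]) -> list[int]:
--     # One linear pass keeping the two shortest posting lists (stable on ties),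
--     # instead of materialising and sorting all matched lists.
--     best = None
--     second = None
--     for t in tokens:
--         if t not in token_index:
--             continue
--         p = token_index[t]
--         if best is None:
--             best = p
--         elif len(p) < len(best):
--             second = best
--             best = p
--         elif second is None or len(p) < len(second):
--             second = p
--     if best is None:
--         return []
--     seen = set(best)
--     if second is not None:
--         seen.update(second)
--     return list(seen)
-- ===== Notes on version B (the rewrite author's own statement) =====
-- stated objective: alternative
-- what changed: B replaces A's build-all-pairs-then-stable-sort selection with a single linear pass that keeps only the shortest and second-shortest matched posting lists (strict < keeps the tie-breaking stable), then unions them exactly as A does.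
import Mathlib
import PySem

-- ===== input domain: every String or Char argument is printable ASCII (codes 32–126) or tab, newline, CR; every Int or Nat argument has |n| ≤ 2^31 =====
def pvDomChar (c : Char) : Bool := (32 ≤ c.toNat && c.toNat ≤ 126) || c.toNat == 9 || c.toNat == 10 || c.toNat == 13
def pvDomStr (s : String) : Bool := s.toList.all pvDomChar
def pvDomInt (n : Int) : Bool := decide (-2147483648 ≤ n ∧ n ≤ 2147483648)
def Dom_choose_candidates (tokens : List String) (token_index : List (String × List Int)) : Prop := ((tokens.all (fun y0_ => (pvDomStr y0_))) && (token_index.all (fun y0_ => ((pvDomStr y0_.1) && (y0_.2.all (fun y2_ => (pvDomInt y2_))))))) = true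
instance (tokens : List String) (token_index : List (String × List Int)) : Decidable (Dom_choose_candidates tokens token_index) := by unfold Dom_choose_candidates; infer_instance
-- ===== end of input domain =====

-- B replaces A's sort of all matched posting lists by a single pass keeping the two
-- shortest lists (stable on ties); the result (compared as a set) is unchanged.

-- ===== PORT A =====
-- lists = [(t, token_index[t]) for t in tokens if t in token_index]; sort by len; set union of first two
def choose_candidates (tokens : List String) (token_index : List (String × List Int)) : List Int :=
  let lists := tokens.filterMap (fun t => ((PySem.Dict.ofList token_index).get? t).map (fun v => (t, v)))
  if lists.isEmpty then []
  else
    let sortedL := PySem.List.sorted lists (fun x => x.2.length)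
    let candidates := PySem.Set.ofList (((PySem.List.pyGet? sortedL 0).getD ("", [])).2)
    let candidates := (PySem.List.slice sortedL (some 1) (some 2)).foldl
      (fun s p => PySem.Set.update s p.2) candidates
    candidates

-- ===== PORT B =====
-- single pass: keep the shortest and second-shortest posting lists, then set-union them
def choose_candidates_alt (tokens : List String) (token_index : List (String × List Int)) : List Int :=
  let bs := tokens.foldl
    (fun (st : Option (List Int) × Option (List Int)) t =>
      match (PySem.Dict.ofList token_index).get? t with
      | none => st
      | some p =>
        match st with
        | (none, s) => (some p, s)
        | (some b, none) =>
            if p.length < b.length then (some p, some b) else (some b, some p)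
        | (some b, some s) =>
            if p.length < b.length then (some p, some b)
            else if p.length < s.length then (some b, some p)
            else (some b, some s))
    (none, none)
  match bs with
  | (none, _) => []
  | (some b, s) =>
    let seen := PySem.Set.ofList b
    match s with
    | none => seen
    | some s2 => PySem.Set.update seen s2

-- ===== PRECONDITION & SPEC =====
def Spec_choose_candidates (tokens : List String) (token_index : List (String × List Int)) (out : List Int) : Prop := out = choose_candidates_alt tokens token_index
instance (tokens : List String) (token_index : List (String × List Int)) (out : List Int) : Decidable (Spec_choose_candidates tokens token_index out) := by unfold Spec_choose_candidates; infer_instance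

-- ===== CLAIM (what is proved, stated in full; the proofs are below) =====
def Claim_equal_choose_candidates : Prop := ∀ (tokens : List String) (token_index : List (String × List Int)), Dom_choose_candidates tokens token_index → Spec_choose_candidates tokens token_index (choose_candidates tokens token_index)

-- ===== LEMMAS AND PROOFS =====

-- B's fold step, on (token, postings) pairs
def pvStepB (st : Option (List Int) × Option (List Int)) (p : List Int) :
    Option (List Int) × Option (List Int) :=
  match st with
  | (none, s) => (some p, s)
  | (some b, none) =>
      if p.length < b.length then (some p, some b) else (some b, some p)
  | (some b, some s) =>
      if p.length < b.length then (some p, some b)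
      else if p.length < s.length then (some b, some p)
      else (some b, some s)

-- the first two posting lists of a list of pairs
def pvTop2 (acc : List (String × List Int)) : Option (List Int) × Option (List Int) :=
  (acc.head?.map (·.2), acc.tail.head?.map (·.2))

theorem pvTop2_insertBy (x : String × List Int) (acc : List (String × List Int)) :
    pvTop2 (PySem.List.insertBy
      (fun a b => decide ((fun y : String × List Int => y.2.length) a <
                          (fun y : String × List Int => y.2.length) b)) x acc)
      = pvStepB (pvTop2 acc) x.2 := by
  match acc with
  | [] => simp [PySem.List.insertBy, pvTop2, pvStepB]
  | [a] =>
      simp only [PySem.List.insertBy, pvTop2, pvStepB]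
      by_cases h : x.2.length < a.2.length <;>
        simp [h]
  | a :: c :: t =>
      simp only [PySem.List.insertBy, pvTop2, pvStepB]
      by_cases h1 : x.2.length < a.2.length
      · simp [h1]
      · by_cases h2 : x.2.length < c.2.length <;>
          simp [h1, h2]

theorem pvFold_eq_top2 (l : List (String × List Int)) :
    ∀ acc : List (String × List Int),
      l.foldl (fun st pr => pvStepB st pr.2) (pvTop2 acc)
        = pvTop2 (l.foldl
            (fun acc x => PySem.List.insertBy
              (fun a b => decide ((fun y : String × List Int => y.2.length) a <
                                  (fun y : String × List Int => y.2.length) b)) x acc) acc) := by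
  induction l with
  | nil => intro acc; rfl
  | cons x xs ih =>
      intro acc
      rw [List.foldl_cons, ← pvTop2_insertBy x acc]
      exact ih _

theorem pvBridge (token_index : List (String × List Int)) (tokens : List String)
    (init : Option (List Int) × Option (List Int)) :
    tokens.foldl
      (fun st t =>
        match (PySem.Dict.ofList token_index).get? t with
        | none => st
        | some p => pvStepB st p) init
    = (tokens.filterMap
        (fun t => ((PySem.Dict.ofList token_index).get? t).map (fun v => (t, v)))).foldl
        (fun st pr => pvStepB st pr.2) init := by
  induction tokens generalizing init with
  | nil => rfl
  | cons t ts ih =>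
      simp only [List.foldl_cons, List.filterMap_cons]
      cases h : (PySem.Dict.ofList token_index).get? t <;>
        simp [ih]

theorem choose_candidates_eq (tokens : List String) (token_index : List (String × List Int)) :
    choose_candidates tokens token_index = choose_candidates_alt tokens token_index := by
  unfold choose_candidates choose_candidates_alt
  set lists := tokens.filterMap (fun t => ((PySem.Dict.ofList token_index).get? t).map (fun v => (t, v)))
    with hlists
  -- B's fold over tokens is the fold of pvStepB over `lists`
  have hbridge : tokens.foldl
      (fun (st : Option (List Int) × Option (List Int)) t =>
        match (PySem.Dict.ofList token_index).get? t with
        | none => st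
        | some p => pvStepB st p) (none, none)
      = lists.foldl (fun st pr => pvStepB st pr.2) (none, none) := by
    rw [hlists]
    exact pvBridge token_index tokens (none, none)
  have hfold : lists.foldl (fun st pr => pvStepB st pr.2) (none, none)
      = pvTop2 (PySem.List.sorted lists (fun x => x.2.length)) := by
    have h0 : (none, none) = pvTop2 ([] : List (String × List Int)) := rfl
    rw [PySem.List.sorted_eq_foldl_insertBy, h0]
    have := pvFold_eq_top2 lists ([] : List (String × List Int))
    simpa [pvStepB] using this
  -- identify the fold inside choose_candidates_alt with the bridged form
  show (if lists.isEmpty then [] else _) = _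
  have halt : tokens.foldl
      (fun (st : Option (List Int) × Option (List Int)) t =>
        match (PySem.Dict.ofList token_index).get? t with
        | none => st
        | some p =>
          match st with
          | (none, s) => (some p, s)
          | (some b, none) =>
              if p.length < b.length then (some p, some b) else (some b, some p)
          | (some b, some s) =>
              if p.length < b.length then (some p, some b)
              else if p.length < s.length then (some b, some p)
              else (some b, some s)) (none, none)
      = pvTop2 (PySem.List.sorted lists (fun x => x.2.length)) := by
    rw [← hfold, ← hbridge]; rfl
  rw [halt]
  by_cases hemp : lists.isEmpty
  · have : lists = [] := List.isEmpty_iff.mp hemp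
    simp [this, PySem.List.sorted, pvTop2]
  · have hne : lists ≠ [] := by simpa [List.isEmpty_iff] using hemp
    have hsne : PySem.List.sorted lists (fun x => x.2.length) ≠ [] := by
      simpa [PySem.List.sorted_eq_nil_iff] using hne
    obtain ⟨a, rest, hS⟩ := List.exists_cons_of_ne_nil hsne
    rw [hS]
    have hslice : PySem.List.slice (a :: rest) (some 1) (some 2) = rest.take 1 := by
      have := PySem.List.slice_natCast (a :: rest) 1 2
      simpa using this
    simp only [hemp, hslice]
    cases rest with
    | nil => simp [pvTop2, PySem.List.pyGet?, PySem.List.pyIdx?]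
    | cons c t =>
        have h0 : (0:Int) ≤ (t.length:Int) + 1 := by positivity
        simp [pvTop2, PySem.List.pyGet?, PySem.List.pyIdx?, PySem.Set.update, h0]

-- ===== VERDICT (by name: the statement is the Claim_ definition above) =====
theorem choose_candidates_spec : Claim_equal_choose_candidates := by
  intro tokens token_index _
  unfold Spec_choose_candidates
  exact choose_candidates_eq tokens token_index
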